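-- pv_equiv track=rewrite | github.com/plturrell/finsightdeep_mctx_enterprise | mctx/enterprise/hana_query_cache.py | _is_query_using_table
-- ===== SOURCE A (Python) =====
-- def _is_query_using_table(query: str, table_name: str) -> bool:
--     """Check if a query uses a specific table.
--
--     Args:
--         query: The SQL query string.
--         table_name: The table name to check.
--
--     Returns:
--         True if the query uses the table, False otherwise.
--     """
--     query_upper = query.upper()
--     table_upper = table_name.upper()
--
--     # Common patterns for table references
--     patterns = [
--         f"FROM {table_upper} ",
--         f"FROM {table_upper},",
--         f"FROM {table_upper}.",
--         f"FROM {table_upper}\n",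
--         f"FROM {table_upper})",
--         f"JOIN {table_upper} ",
--         f"JOIN {table_upper},",
--         f"JOIN {table_upper}.",
--         f"JOIN {table_upper}\n",
--         f"JOIN {table_upper})",
--         f"UPDATE {table_upper} ",
--         f"INSERT INTO {table_upper} ",
--         f"DELETE FROM {table_upper} ",
--         f"MERGE INTO {table_upper} "
--     ]
--
--     for pattern in patterns:
--         if pattern in query_upper:
--             return True
--
--     return False
-- ===== SOURCE B (Python) =====
-- def _is_query_using_table(query: str, table_name: str) -> bool:
--     """Check if a query uses a specific table (occurrence-scan re-implementation)."""
--     q = query.upper()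
--     t = table_name.upper()
--     n = len(t)
--     for i in range(len(q) + 1):
--         if q[i:i + n] != t:
--             continue
--         pre = q[:i]
--         nxt = q[i + n:i + n + 1]
--         if (pre.endswith("FROM ") or pre.endswith("JOIN ")) and nxt in (" ", ",", ".", "\n", ")"):
--             return True
--         if (pre.endswith("UPDATE ") or pre.endswith("INSERT INTO ")
--                 or pre.endswith("DELETE FROM ") or pre.endswith("MERGE INTO ")) and nxt == " ":
--             return True
--     return False
-- ===== Notes on version B (the rewrite author's own statement) =====
-- stated objective: alternative
-- what changed: Replaces A's membership test of 14 precomputed keyword-table-delimiter patterns by a single scan over the indices of query_upper that checks, at each occurrence of the table name, the keyword ending the prefix and the delimiter character that follows.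
import Mathlib
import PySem

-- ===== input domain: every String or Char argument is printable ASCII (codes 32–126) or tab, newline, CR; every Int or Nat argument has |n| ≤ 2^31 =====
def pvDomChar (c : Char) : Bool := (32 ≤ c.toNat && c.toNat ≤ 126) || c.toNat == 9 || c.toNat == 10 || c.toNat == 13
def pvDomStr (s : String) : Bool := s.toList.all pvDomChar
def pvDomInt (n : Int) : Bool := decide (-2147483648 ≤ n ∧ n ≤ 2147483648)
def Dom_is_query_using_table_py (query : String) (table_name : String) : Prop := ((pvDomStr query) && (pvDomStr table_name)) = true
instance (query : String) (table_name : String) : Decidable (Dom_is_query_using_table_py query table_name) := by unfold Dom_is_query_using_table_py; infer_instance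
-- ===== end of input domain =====

-- B replaces A's membership test of 14 precomputed patterns by a scan over occurrence
-- positions of the table name, checking the preceding keyword and the following delimiter
-- at each position (alternative decomposition, same asymptotic cost).

-- ===== PORT A =====
-- literal port of A: build the 14 patterns, return True on the first one contained in query_upper
def is_query_using_table_py (query : String) (table_name : String) : Bool :=
  let qU := PySem.Chars.upper query.toList
  let tU := PySem.Chars.upper table_name.toList
  let patterns : List (List Char) :=
    [ "FROM ".toList ++ tU ++ " ".toList
    , "FROM ".toList ++ tU ++ ",".toList
    , "FROM ".toList ++ tU ++ ".".toList
    , "FROM ".toList ++ tU ++ "\n".toList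
    , "FROM ".toList ++ tU ++ ")".toList
    , "JOIN ".toList ++ tU ++ " ".toList
    , "JOIN ".toList ++ tU ++ ",".toList
    , "JOIN ".toList ++ tU ++ ".".toList
    , "JOIN ".toList ++ tU ++ "\n".toList
    , "JOIN ".toList ++ tU ++ ")".toList
    , "UPDATE ".toList ++ tU ++ " ".toList
    , "INSERT INTO ".toList ++ tU ++ " ".toList
    , "DELETE FROM ".toList ++ tU ++ " ".toList
    , "MERGE INTO ".toList ++ tU ++ " ".toList ]
  patterns.any (fun p => PySem.Chars.isIn p qU)

-- ===== PORT B =====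
-- the body of B's loop: does the table name occur at index i with a keyword before and a delimiter after?
def pvAltCheck (q t : List Char) (i : Nat) : Bool :=
  if PySem.List.slice q (some (i : Int)) (some ((i : Int) + t.length)) ≠ t then false
  else
    let pre := PySem.List.slice q none (some (i : Int))
    let nxt := PySem.List.slice q (some ((i : Int) + t.length)) (some ((i : Int) + t.length + 1))
    ((PySem.Chars.endswith pre "FROM ".toList || PySem.Chars.endswith pre "JOIN ".toList)
        && (nxt == " ".toList || nxt == ",".toList || nxt == ".".toList
              || nxt == "\n".toList || nxt == ")".toList))
    || ((PySem.Chars.endswith pre "UPDATE ".toList || PySem.Chars.endswith pre "INSERT INTO ".toList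
          || PySem.Chars.endswith pre "DELETE FROM ".toList || PySem.Chars.endswith pre "MERGE INTO ".toList)
        && nxt == " ".toList)

def is_query_using_table_py_alt (query : String) (table_name : String) : Bool :=
  let q := PySem.Chars.upper query.toList
  let t := PySem.Chars.upper table_name.toList
  (List.range (q.length + 1)).any (fun i => pvAltCheck q t i)

-- ===== PRECONDITION & SPEC =====
def Spec_is_query_using_table_py (query : String) (table_name : String) (out : Bool) : Prop := out = is_query_using_table_py_alt query table_name
instance (query : String) (table_name : String) (out : Bool) : Decidable (Spec_is_query_using_table_py query table_name out) := by unfold Spec_is_query_using_table_py; infer_instance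

-- ===== CLAIM (what is proved, stated in full; the proofs are below) =====
def Claim_equal_is_query_using_table_py : Prop := ∀ (query : String) (table_name : String), Dom_is_query_using_table_py query table_name → Spec_is_query_using_table_py query table_name (is_query_using_table_py query table_name)

-- ===== LEMMAS AND PROOFS =====

-- a pattern  key ++ t ++ [d]  is an infix of q  ↔  t occurs at some index i with key just
-- before it and d just after it (the shape B's loop tests)
lemma pv_decomp (q t key : List Char) (d : Char) :
    (key ++ t ++ [d]) <:+: q ↔
      ∃ i ≤ q.length, (q.drop i).take t.length = t ∧ key <:+ q.take i ∧
        (q.drop (i + t.length)).take 1 = [d] := by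
  constructor
  · rintro ⟨u, v, rfl⟩
    refine ⟨u.length + key.length, ?_, ?_, ?_, ?_⟩
    · simp only [List.length_append]; omega
    · have h : u ++ (key ++ t ++ [d]) ++ v = (u ++ key) ++ (t ++ (d :: v)) := by simp
      have hlen : u.length + key.length = (u ++ key).length := by
        simp only [List.length_append]
      rw [h, hlen, List.drop_left, List.take_append_of_le_length (by simp), List.take_length]
    · have h : u ++ (key ++ t ++ [d]) ++ v = (u ++ key) ++ (t ++ (d :: v)) := by simp
      have hlen : u.length + key.length = (u ++ key).length := by
        simp only [List.length_append]
      rw [h, hlen, List.take_left]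
      exact ⟨u, rfl⟩
    · have h : u ++ (key ++ t ++ [d]) ++ v = ((u ++ key) ++ t) ++ (d :: v) := by simp
      have hlen : u.length + key.length + t.length = ((u ++ key) ++ t).length := by
        simp only [List.length_append]
      rw [h, hlen, List.drop_left]
      rfl
  · rintro ⟨i, hi, ht, ⟨u, hu⟩, hd⟩
    have hdrop : q.drop i = t ++ q.drop (i + t.length) := by
      conv_lhs => rw [← List.take_append_drop t.length (q.drop i)]
      rw [ht, List.drop_drop]
    have htail : q.drop (i + t.length) = d :: (q.drop (i + t.length)).tail := by
      cases h : q.drop (i + t.length) with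
      | nil => rw [h] at hd; simp at hd
      | cons a l =>
          rw [h] at hd
          simp only [List.take_succ_cons, List.take_zero, List.cons.injEq] at hd
          rw [hd.1]
          rfl
    refine ⟨u, (q.drop (i + t.length)).tail, ?_⟩
    calc u ++ (key ++ t ++ [d]) ++ (q.drop (i + t.length)).tail
        = (u ++ key) ++ (t ++ (d :: (q.drop (i + t.length)).tail)) := by simp
      _ = q.take i ++ (t ++ q.drop (i + t.length)) := by rw [hu, ← htail]
      _ = q.take i ++ q.drop i := by rw [← hdrop]
      _ = q := List.take_append_drop i q

-- read B's per-index check as a proposition (for i in range, i.e. i ≤ q.length)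
lemma pv_altCheck_iff (q t : List Char) (i : Nat) :
    pvAltCheck q t i = true ↔
      (q.drop i).take t.length = t ∧
        ((("FROM ".toList <:+ q.take i ∨ "JOIN ".toList <:+ q.take i) ∧
            (((((q.drop (i + t.length)).take 1 = [' '] ∨ (q.drop (i + t.length)).take 1 = [',']) ∨
               (q.drop (i + t.length)).take 1 = ['.']) ∨ (q.drop (i + t.length)).take 1 = ['\n']) ∨
             (q.drop (i + t.length)).take 1 = [')'])) ∨
         (((("UPDATE ".toList <:+ q.take i ∨ "INSERT INTO ".toList <:+ q.take i) ∨
            "DELETE FROM ".toList <:+ q.take i) ∨ "MERGE INTO ".toList <:+ q.take i) ∧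
            (q.drop (i + t.length)).take 1 = [' '])) := by
  have e0 : ((i : Int)).toNat = i := by omega
  have e2 : ((i : Int) + (t.length : Int)).toNat = i + t.length := by omega
  have e3 : ((i : Int) + (t.length : Int) + 1).toNat = i + t.length + 1 := by omega
  have h1 : PySem.List.slice q (some (i : Int)) (some ((i : Int) + t.length)) = (q.drop i).take t.length := by
    rw [PySem.List.slice_toNat q (by positivity) (by positivity), e0, e2]
    congr 1
    omega
  have h2 : PySem.List.slice q none (some (i : Int)) = q.take i := by
    rw [PySem.List.slice_to q (by positivity), e0]
  have h3 : PySem.List.slice q (some ((i : Int) + t.length)) (some ((i : Int) + t.length + 1)) =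
      (q.drop (i + t.length)).take 1 := by
    rw [PySem.List.slice_toNat q (by positivity) (by positivity), e2, e3]
    congr 1
    omega
  unfold pvAltCheck
  rw [h1, h2, h3]
  split_ifs with hne
  · simp only [false_iff]
    rintro ⟨h, -⟩
    exact hne h
  · simp only [ne_eq, not_not] at hne
    simp only [hne, true_and, Bool.or_eq_true, Bool.and_eq_true, beq_iff_eq,
      PySem.Chars.endswith_iff]
    have d1 : (" ".toList : List Char) = [' '] := rfl
    have d2 : (",".toList : List Char) = [','] := rfl
    have d3 : (".".toList : List Char) = ['.'] := rfl
    have d4 : ("\n".toList : List Char) = ['\n'] := rfl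
    have d5 : (")".toList : List Char) = [')'] := rfl
    rw [d1, d2, d3, d4, d5]

-- the heart: for any q t, A's pattern test equals B's index scan
set_option maxHeartbeats 2000000 in
lemma pv_main (q t : List Char) :
    ([ "FROM ".toList ++ t ++ " ".toList
     , "FROM ".toList ++ t ++ ",".toList
     , "FROM ".toList ++ t ++ ".".toList
     , "FROM ".toList ++ t ++ "\n".toList
     , "FROM ".toList ++ t ++ ")".toList
     , "JOIN ".toList ++ t ++ " ".toList
     , "JOIN ".toList ++ t ++ ",".toList
     , "JOIN ".toList ++ t ++ ".".toList
     , "JOIN ".toList ++ t ++ "\n".toList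
     , "JOIN ".toList ++ t ++ ")".toList
     , "UPDATE ".toList ++ t ++ " ".toList
     , "INSERT INTO ".toList ++ t ++ " ".toList
     , "DELETE FROM ".toList ++ t ++ " ".toList
     , "MERGE INTO ".toList ++ t ++ " ".toList ].any (fun p => PySem.Chars.isIn p q))
    = (List.range (q.length + 1)).any (fun i => pvAltCheck q t i) := by
  have d1 : (" ".toList : List Char) = [' '] := rfl
  have d2 : (",".toList : List Char) = [','] := rfl
  have d3 : (".".toList : List Char) = ['.'] := rfl
  have d4 : ("\n".toList : List Char) = ['\n'] := rfl
  have d5 : (")".toList : List Char) = [')'] := rfl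
  rw [Bool.eq_iff_iff]
  simp only [List.any_eq_true, List.mem_range, Nat.lt_succ_iff, List.any_cons, List.any_nil,
    Bool.or_eq_true, Bool.false_eq_true, or_false, PySem.Chars.isIn_iff_infix,
    d1, d2, d3, d4, d5]
  have hpat : ∀ (key : List Char) (d : Char),
      (key ++ t ++ [d]) <:+: q ↔
        ∃ i ≤ q.length, (q.drop i).take t.length = t ∧ key <:+ q.take i ∧
          (q.drop (i + t.length)).take 1 = [d] := fun key d => pv_decomp q t key d
  constructor
  · have mk : ∀ (key : List Char) (d : Char), (key ++ t ++ [d]) <:+: q →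
        ∃ i ≤ q.length, ((q.drop i).take t.length = t ∧ key <:+ q.take i ∧
          (q.drop (i + t.length)).take 1 = [d]) := by
      intro key d h
      obtain ⟨i, hi, h1, h2, h3⟩ := (hpat key d).mp h
      exact ⟨i, hi, h1, h2, h3⟩
    rintro (h | h | h | h | h | h | h | h | h | h | h | h | h | h)
    · obtain ⟨i, hi, h1, h2, h3⟩ := mk _ _ h
      exact ⟨i, hi, (pv_altCheck_iff q t i).mpr ⟨h1, Or.inl ⟨Or.inl h2, Or.inl (Or.inl (Or.inl (Or.inl h3)))⟩⟩⟩
    · obtain ⟨i, hi, h1, h2, h3⟩ := mk _ _ h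
      exact ⟨i, hi, (pv_altCheck_iff q t i).mpr ⟨h1, Or.inl ⟨Or.inl h2, Or.inl (Or.inl (Or.inl (Or.inr h3)))⟩⟩⟩
    · obtain ⟨i, hi, h1, h2, h3⟩ := mk _ _ h
      exact ⟨i, hi, (pv_altCheck_iff q t i).mpr ⟨h1, Or.inl ⟨Or.inl h2, Or.inl (Or.inl (Or.inr h3))⟩⟩⟩
    · obtain ⟨i, hi, h1, h2, h3⟩ := mk _ _ h
      exact ⟨i, hi, (pv_altCheck_iff q t i).mpr ⟨h1, Or.inl ⟨Or.inl h2, Or.inl (Or.inr h3)⟩⟩⟩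
    · obtain ⟨i, hi, h1, h2, h3⟩ := mk _ _ h
      exact ⟨i, hi, (pv_altCheck_iff q t i).mpr ⟨h1, Or.inl ⟨Or.inl h2, Or.inr h3⟩⟩⟩
    · obtain ⟨i, hi, h1, h2, h3⟩ := mk _ _ h
      exact ⟨i, hi, (pv_altCheck_iff q t i).mpr ⟨h1, Or.inl ⟨Or.inr h2, Or.inl (Or.inl (Or.inl (Or.inl h3)))⟩⟩⟩
    · obtain ⟨i, hi, h1, h2, h3⟩ := mk _ _ h
      exact ⟨i, hi, (pv_altCheck_iff q t i).mpr ⟨h1, Or.inl ⟨Or.inr h2, Or.inl (Or.inl (Or.inl (Or.inr h3)))⟩⟩⟩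
    · obtain ⟨i, hi, h1, h2, h3⟩ := mk _ _ h
      exact ⟨i, hi, (pv_altCheck_iff q t i).mpr ⟨h1, Or.inl ⟨Or.inr h2, Or.inl (Or.inl (Or.inr h3))⟩⟩⟩
    · obtain ⟨i, hi, h1, h2, h3⟩ := mk _ _ h
      exact ⟨i, hi, (pv_altCheck_iff q t i).mpr ⟨h1, Or.inl ⟨Or.inr h2, Or.inl (Or.inr h3)⟩⟩⟩
    · obtain ⟨i, hi, h1, h2, h3⟩ := mk _ _ h
      exact ⟨i, hi, (pv_altCheck_iff q t i).mpr ⟨h1, Or.inl ⟨Or.inr h2, Or.inr h3⟩⟩⟩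
    · obtain ⟨i, hi, h1, h2, h3⟩ := mk _ _ h
      exact ⟨i, hi, (pv_altCheck_iff q t i).mpr ⟨h1, Or.inr ⟨Or.inl (Or.inl (Or.inl h2)), h3⟩⟩⟩
    · obtain ⟨i, hi, h1, h2, h3⟩ := mk _ _ h
      exact ⟨i, hi, (pv_altCheck_iff q t i).mpr ⟨h1, Or.inr ⟨Or.inl (Or.inl (Or.inr h2)), h3⟩⟩⟩
    · obtain ⟨i, hi, h1, h2, h3⟩ := mk _ _ h
      exact ⟨i, hi, (pv_altCheck_iff q t i).mpr ⟨h1, Or.inr ⟨Or.inl (Or.inr h2), h3⟩⟩⟩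
    · obtain ⟨i, hi, h1, h2, h3⟩ := mk _ _ h
      exact ⟨i, hi, (pv_altCheck_iff q t i).mpr ⟨h1, Or.inr ⟨Or.inr h2, h3⟩⟩⟩
  · rintro ⟨i, hi, hc⟩
    obtain ⟨h1, hrest⟩ := (pv_altCheck_iff q t i).mp hc
    rcases hrest with ⟨hk, hd⟩ | ⟨hk, hd⟩
    · rcases hk with hk | hk <;> rcases hd with (((hd | hd) | hd) | hd) | hd
      · exact Or.inl ((hpat _ ' ').mpr ⟨i, hi, h1, hk, hd⟩)
      · exact Or.inr (Or.inl ((hpat _ ',').mpr ⟨i, hi, h1, hk, hd⟩))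
      · exact Or.inr (Or.inr (Or.inl ((hpat _ '.').mpr ⟨i, hi, h1, hk, hd⟩)))
      · exact Or.inr (Or.inr (Or.inr (Or.inl ((hpat _ '\n').mpr ⟨i, hi, h1, hk, hd⟩))))
      · exact Or.inr (Or.inr (Or.inr (Or.inr (Or.inl ((hpat _ ')').mpr ⟨i, hi, h1, hk, hd⟩)))))
      · exact Or.inr (Or.inr (Or.inr (Or.inr (Or.inr (Or.inl ((hpat _ ' ').mpr ⟨i, hi, h1, hk, hd⟩))))))
      · exact Or.inr (Or.inr (Or.inr (Or.inr (Or.inr (Or.inr (Or.inl ((hpat _ ',').mpr ⟨i, hi, h1, hk, hd⟩)))))))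
      · exact Or.inr (Or.inr (Or.inr (Or.inr (Or.inr (Or.inr (Or.inr (Or.inl ((hpat _ '.').mpr ⟨i, hi, h1, hk, hd⟩))))))))
      · exact Or.inr (Or.inr (Or.inr (Or.inr (Or.inr (Or.inr (Or.inr (Or.inr (Or.inl ((hpat _ '\n').mpr ⟨i, hi, h1, hk, hd⟩)))))))))
      · exact Or.inr (Or.inr (Or.inr (Or.inr (Or.inr (Or.inr (Or.inr (Or.inr (Or.inr (Or.inl ((hpat _ ')').mpr ⟨i, hi, h1, hk, hd⟩))))))))))
    · rcases hk with ((hk | hk) | hk) | hk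
      · exact Or.inr (Or.inr (Or.inr (Or.inr (Or.inr (Or.inr (Or.inr (Or.inr (Or.inr (Or.inr (Or.inl ((hpat _ ' ').mpr ⟨i, hi, h1, hk, hd⟩)))))))))))
      · exact Or.inr (Or.inr (Or.inr (Or.inr (Or.inr (Or.inr (Or.inr (Or.inr (Or.inr (Or.inr (Or.inr (Or.inl ((hpat _ ' ').mpr ⟨i, hi, h1, hk, hd⟩))))))))))))
      · exact Or.inr (Or.inr (Or.inr (Or.inr (Or.inr (Or.inr (Or.inr (Or.inr (Or.inr (Or.inr (Or.inr (Or.inr (Or.inl ((hpat _ ' ').mpr ⟨i, hi, h1, hk, hd⟩)))))))))))))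
      · exact Or.inr (Or.inr (Or.inr (Or.inr (Or.inr (Or.inr (Or.inr (Or.inr (Or.inr (Or.inr (Or.inr (Or.inr (Or.inr ((hpat _ ' ').mpr ⟨i, hi, h1, hk, hd⟩)))))))))))))

-- ===== VERDICT (by name: the statement is the Claim_ definition above) =====
theorem is_query_using_table_py_spec : Claim_equal_is_query_using_table_py := by
  intro query table_name _
  unfold Spec_is_query_using_table_py is_query_using_table_py is_query_using_table_py_alt
  exact pv_main (PySem.Chars.upper query.toList) (PySem.Chars.upper table_name.toList)
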